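-- pv_equiv track=rewrite | github.com/TechHares/leek | leek/strategy/strategy_bollinger_bands.py | just_one_cross
-- ===== SOURCE A (Python) =====
-- def just_one_cross(data, cross_type=1):
--     """
--     判断是否只有一次交叉
--     :param data: 数据
--     :param cross_type: 1 金叉  2 死叉
--     :return:
--     """
--     cross = 0
--     for idx in range(len(data) - 1):
--         if data[idx] * data[idx + 1] < 0:  # cross
--             if cross > 0:
--                 return False
--             if data[idx] > 0 and cross_type == 1:  # 死叉
--                 return False
--             if data[idx] < 0 and cross_type == 2:  # 金叉
--                 return False
--             cross += 1
--     return cross == 1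
-- ===== SOURCE B (Python) =====
-- def just_one_cross(data, cross_type=1):
--     # Run-length compress the data into its sequence of distinct consecutive signs
--     # (-1, 0, +1); a crossing is exactly a boundary between a +1 run and a -1 run.
--     signs = []
--     for x in data:
--         s = (x > 0) - (x < 0)
--         if not signs or signs[-1] != s:
--             signs.append(s)
--     flips = [u for u, v in zip(signs, signs[1:]) if u * v == -1]
--     if len(flips) != 1:
--         return False
--     u = flips[0]
--     return not (u > 0 and cross_type == 1 or u < 0 and cross_type == 2)
-- ===== Notes on version B (the rewrite author's own statement) =====
-- stated objective: alternative
-- what changed: Instead of scanning adjacent data pairs, B run-length compresses the data into its sequence of distinct consecutive signs (-1/0/+1) and decides from the +/- boundaries of that compressed sequence (a data crossing is exactly a sign-run boundary with product -1; zero runs block crossings).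
import Mathlib
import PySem

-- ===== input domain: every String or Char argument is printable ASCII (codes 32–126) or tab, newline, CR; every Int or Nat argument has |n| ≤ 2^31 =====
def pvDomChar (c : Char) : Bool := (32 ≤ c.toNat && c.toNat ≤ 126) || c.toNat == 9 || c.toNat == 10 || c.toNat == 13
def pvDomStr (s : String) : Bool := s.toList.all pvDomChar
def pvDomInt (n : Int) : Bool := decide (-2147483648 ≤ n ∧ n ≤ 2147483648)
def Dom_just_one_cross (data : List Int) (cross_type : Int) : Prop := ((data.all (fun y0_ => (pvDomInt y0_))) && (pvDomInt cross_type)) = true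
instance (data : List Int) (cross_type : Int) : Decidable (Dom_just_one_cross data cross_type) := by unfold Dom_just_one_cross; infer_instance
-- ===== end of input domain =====

-- B replaces A's adjacent-pair scan by a run-length compression of the data into its
-- sequence of distinct consecutive signs, then decides from the +/- run boundaries;
-- same cost, alternative algorithm.

-- ===== PORT A =====
-- loop over idx in range(len(data)-1): data[idx], data[idx+1] are successive elements,
-- so the index loop is transcribed as structural recursion over adjacent pairs,
-- carrying the `cross` counter; early `return False` becomes returning false.
def justOneCrossLoop : List Int → Int → Int → Bool
  | a :: b :: rest, cross, ct =>
      if a * b < 0 then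
        if cross > 0 then false
        else if a > 0 ∧ ct = 1 then false
        else if a < 0 ∧ ct = 2 then false
        else justOneCrossLoop (b :: rest) (cross + 1) ct
      else justOneCrossLoop (b :: rest) cross ct
  | _, cross, _ => cross == 1

def just_one_cross (data : List Int) (cross_type : Int) : Bool :=
  justOneCrossLoop data 0 cross_type

-- ===== PORT B =====
-- (x > 0) - (x < 0)  : Python's bool-arithmetic sign; ported as the exact case split
def signOf (x : Int) : Int := (if x > 0 then 1 else 0) - (if x < 0 then 1 else 0)

-- the append loop building `signs` (signs[-1] = getLast?)
def signRuns (data : List Int) : List Int :=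
  data.foldl
    (fun acc x =>
      let s := signOf x
      if acc = [] ∨ acc.getLast? ≠ some s then acc ++ [s] else acc)
    []

-- [u for u, v in zip(signs, signs[1:]) if u * v == -1]
def runFlips (signs : List Int) : List Int :=
  ((signs.zip (signs.drop 1)).filter (fun p => p.1 * p.2 == -1)).map Prod.fst

def just_one_cross_alt (data : List Int) (cross_type : Int) : Bool :=
  match runFlips (signRuns data) with
  | [u] => !((u > 0 && cross_type == 1) || (u < 0 && cross_type == 2))
  | _ => false

-- ===== PRECONDITION & SPEC =====
def Spec_just_one_cross (data : List Int) (cross_type : Int) (out : Bool) : Prop := out = just_one_cross_alt data cross_type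
instance (data : List Int) (cross_type : Int) (out : Bool) : Decidable (Spec_just_one_cross data cross_type out) := by unfold Spec_just_one_cross; infer_instance

-- ===== CLAIM (what is proved, stated in full; the proofs are below) =====
def Claim_equal_just_one_cross : Prop := ∀ (data : List Int) (cross_type : Int), Dom_just_one_cross data cross_type → Spec_just_one_cross data cross_type (just_one_cross data cross_type)

-- ===== LEMMAS AND PROOFS =====

-- signs of the left endpoints of the crossings of the raw data (reference value)
def crossSigns (data : List Int) : List Int :=
  ((data.zip (data.drop 1)).filter (fun p => p.1 * p.2 < 0)).map (fun p => signOf p.1)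

lemma signOf_pos (a : Int) : signOf a > 0 ↔ a > 0 := by
  unfold signOf; split_ifs with h1 h2 <;> simp_all <;> omega

lemma signOf_neg (a : Int) : signOf a < 0 ↔ a < 0 := by
  unfold signOf; split_ifs with h1 h2 <;> simp_all <;> omega

lemma sign_mul_neg (a b : Int) : signOf a * signOf b = -1 ↔ a * b < 0 := by
  unfold signOf
  split_ifs <;> constructor <;> intro h <;> first | omega | nlinarith

lemma crossSigns_cons (a b : Int) (rest : List Int) :
    crossSigns (a :: b :: rest) =
      (if a * b < 0 then [signOf a] else []) ++ crossSigns (b :: rest) := by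
  simp [crossSigns]
  split_ifs with h <;> simp [h]

lemma runFlips_cons (a b : Int) (rest : List Int) :
    runFlips (a :: b :: rest) =
      (if a * b = -1 then [a] else []) ++ runFlips (b :: rest) := by
  simp [runFlips]
  split_ifs with h <;> simp [h]

-- A's loop with cross = 1: true iff no further crossing
lemma loop_one (l : List Int) (ct : Int) :
    justOneCrossLoop l 1 ct = (crossSigns l).isEmpty := by
  match l with
  | [] => rfl
  | [a] => rfl
  | a :: b :: rest =>
    rw [justOneCrossLoop, crossSigns_cons]
    by_cases h : a * b < 0
    · rw [if_pos h, if_pos h, if_pos (by norm_num : (1:Int) > 0)]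
      simp
    · rw [if_neg h, if_neg h]
      simpa using loop_one (b :: rest) ct

-- A's whole loop characterised by crossSigns
lemma loop_zero (l : List Int) (ct : Int) :
    justOneCrossLoop l 0 ct =
      (match crossSigns l with
       | [u] => !((u > 0 && ct == 1) || (u < 0 && ct == 2))
       | _ => false) := by
  match l with
  | [] => rfl
  | [a] => rfl
  | a :: b :: rest =>
    have hmatch : ∀ (x : Int) (C : List Int),
        (match x :: C with
         | [u] => !((u > 0 && ct == 1) || (u < 0 && ct == 2))
         | _ => false) = (C.isEmpty && !((x > 0 && ct == 1) || (x < 0 && ct == 2))) := by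
      intro x C; cases C <;> simp
    rw [justOneCrossLoop, crossSigns_cons]
    by_cases h : a * b < 0
    · rw [if_pos h, if_pos h, List.cons_append, List.nil_append, hmatch,
        if_neg (by norm_num : ¬ ((0:Int) > 0))]
      by_cases h1 : a > 0 ∧ ct = 1
      · rw [if_pos h1]; simp [(signOf_pos a).mpr h1.1, h1.2]
      · rw [if_neg h1]
        by_cases h2 : a < 0 ∧ ct = 2
        · rw [if_pos h2]; simp [(signOf_neg a).mpr h2.1, h2.2]
        · rw [if_neg h2, show (0:Int) + 1 = 1 from rfl, loop_one]
          have hb : ((signOf a > 0 && ct == 1) || (signOf a < 0 && ct == 2)) = false := by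
            simp only [Bool.or_eq_false_iff, Bool.and_eq_false_iff,
              decide_eq_false_iff_not, beq_eq_false_iff_ne, ne_eq,
              signOf_pos, signOf_neg]
            constructor <;> tauto
          simp [hb]
    · rw [if_neg h, if_neg h, List.nil_append]
      exact loop_zero (b :: rest) ct

-- structural form of B's compression loop, carrying the last appended sign
def compAux : Int → List Int → List Int
  | _, [] => []
  | t, x :: xs => if signOf x = t then compAux t xs else signOf x :: compAux (signOf x) xs

lemma signRuns_loop (l acc : List Int) (t : Int) (hne : acc ≠ []) (hlast : acc.getLast? = some t) :
    l.foldl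
      (fun acc x =>
        let s := signOf x
        if acc = [] ∨ acc.getLast? ≠ some s then acc ++ [s] else acc)
      acc = acc ++ compAux t l := by
  match l with
  | [] => simp [compAux]
  | x :: xs =>
    rw [List.foldl_cons, compAux]
    by_cases h : signOf x = t
    · rw [if_neg (by simp [hne, hlast, h]), if_pos h]
      exact signRuns_loop xs acc t hne hlast
    · rw [if_pos (Or.inr (by rw [hlast]; intro hc; exact h (Option.some.inj hc).symm))]
      rw [signRuns_loop xs (acc ++ [signOf x]) (signOf x) (by simp) (by simp), if_neg h]
      simp

lemma signRuns_cons (x : Int) (xs : List Int) :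
    signRuns (x :: xs) = signOf x :: compAux (signOf x) xs := by
  unfold signRuns
  rw [List.foldl_cons]
  simpa using signRuns_loop xs [signOf x] (signOf x) (by simp) (by simp)

-- the crossings of the data are exactly the +/- boundaries of the compressed sign runs
lemma flips_compAux (x : Int) (r : List Int) :
    runFlips (signOf x :: compAux (signOf x) r) = crossSigns (x :: r) := by
  match r with
  | [] => rfl
  | y :: r' =>
    rw [crossSigns_cons, compAux]
    by_cases h : signOf y = signOf x
    · rw [if_pos h]
      have hx : ¬ x * y < 0 := by
        intro hc
        have := (sign_mul_neg x y).mpr hc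
        rw [h] at this
        unfold signOf at this
        split_ifs at this <;> omega
      rw [if_neg hx, List.nil_append, ← h]
      exact flips_compAux y r'
    · rw [if_neg h, runFlips_cons]
      rw [flips_compAux y r']
      congr 1
      by_cases hc : x * y < 0
      · rw [if_pos ((sign_mul_neg x y).mpr hc), if_pos hc]
      · rw [if_neg (fun hm => hc ((sign_mul_neg x y).mp hm)), if_neg hc]

lemma flips_eq_crossSigns (data : List Int) :
    runFlips (signRuns data) = crossSigns data := by
  cases data with
  | nil => rfl
  | cons x xs => rw [signRuns_cons]; exact flips_compAux x xs

-- ===== VERDICT (by name: the statement is the Claim_ definition above) =====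
theorem just_one_cross_spec : Claim_equal_just_one_cross := by
  intro data ct _
  show just_one_cross data ct = just_one_cross_alt data ct
  rw [just_one_cross, loop_zero, just_one_cross_alt, flips_eq_crossSigns]
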